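-- pv_equiv track=rewrite | github.com/DanielSCGray/Algo_Practice | chess_moves.py | all_safe_squares
-- ===== SOURCE A (Python) =====
-- def all_safe_squares(queen: tuple):
--     safe_squares = []
--     for i in range(8):
--         if i == queen[0]:
--             continue
--         for j in range(8):
--             if j == queen[1]:
--                 continue
--             if i + j == queen[0] + queen[1] or i - j == queen[0] - queen[1]:
--                 continue
--             safe_squares.append((i,j))
--     return safe_squares
-- ===== SOURCE B (Python) =====
-- def all_safe_squares(queen: tuple):
--     r, c = queen[0], queen[1]
--     attacked = set()
--     for k in range(8):
--         attacked.add((r, k))          # queen's row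
--         attacked.add((k, c))          # queen's column
--         attacked.add((k, k - (r - c)))  # falling diagonal
--         attacked.add((k, (r + c) - k))  # rising diagonal
--     return [(i, j) for i in range(8) for j in range(8) if (i, j) not in attacked]
-- ===== Notes on version B (the rewrite author's own statement) =====
-- stated objective: idiomatic
-- what changed: B precomputes a set of all squares the queen attacks (row, column and both diagonals, generated per offset k) and then filters the 8x8 board in one row-major comprehension, instead of A's nested loops testing the attack conditions cell by cell with continue statements.
import Mathlib
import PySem

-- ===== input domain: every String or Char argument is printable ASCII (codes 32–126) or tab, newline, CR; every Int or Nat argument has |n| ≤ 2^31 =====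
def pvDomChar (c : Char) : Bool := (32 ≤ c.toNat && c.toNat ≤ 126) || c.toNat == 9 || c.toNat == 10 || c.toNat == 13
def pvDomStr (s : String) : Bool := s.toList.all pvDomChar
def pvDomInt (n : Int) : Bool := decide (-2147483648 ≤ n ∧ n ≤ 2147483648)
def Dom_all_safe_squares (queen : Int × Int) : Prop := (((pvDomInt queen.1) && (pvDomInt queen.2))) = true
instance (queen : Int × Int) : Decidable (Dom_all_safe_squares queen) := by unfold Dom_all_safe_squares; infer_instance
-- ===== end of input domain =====

-- B precomputes the set of attacked squares (row, column, two diagonals) and filters the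
-- board in one row-major pass, instead of testing A's per-cell attack conditions; objective: idiomatic.

-- ===== PORT A =====
def all_safe_squares (queen : Int × Int) : List (Int × Int) :=
  (PySem.List.pyRange 0 8 1).foldl (fun safe_squares i =>
    if i == queen.1 then safe_squares
    else (PySem.List.pyRange 0 8 1).foldl (fun safe_squares j =>
      if j == queen.2 then safe_squares
      else if i + j == queen.1 + queen.2 || i - j == queen.1 - queen.2 then safe_squares
      else safe_squares ++ [(i, j)]) safe_squares) []

-- ===== PORT B =====
-- helper: the loop building the Python set 'attacked'
def pvAttacked (r c : Int) : PySem.Set (Int × Int) :=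
  (PySem.List.pyRange 0 8 1).foldl (fun attacked k =>
    (((attacked.add (r, k)).add (k, c)).add (k, k - (r - c))).add (k, (r + c) - k))
    PySem.Set.empty

def all_safe_squares_alt (queen : Int × Int) : List (Int × Int) :=
  let r := queen.1
  let c := queen.2
  let attacked := pvAttacked r c
  (PySem.List.pyRange 0 8 1).flatMap (fun i =>
    ((PySem.List.pyRange 0 8 1).filter (fun j => !attacked.contains (i, j))).map
      (fun j => (i, j)))

-- ===== PRECONDITION & SPEC =====
def Spec_all_safe_squares (queen : Int × Int) (out : List (Int × Int)) : Prop := out = all_safe_squares_alt queen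
instance (queen : Int × Int) (out : List (Int × Int)) : Decidable (Spec_all_safe_squares queen out) := by unfold Spec_all_safe_squares; infer_instance

-- ===== CLAIM (what is proved, stated in full; the proofs are below) =====
def Claim_equal_all_safe_squares : Prop := ∀ (queen : Int × Int), Dom_all_safe_squares queen → Spec_all_safe_squares queen (all_safe_squares queen)

-- ===== LEMMAS AND PROOFS =====

theorem pvRange8 : PySem.List.pyRange 0 8 1 = [0, 1, 2, 3, 4, 5, 6, 7] := by decide

theorem pvFlatMap_congr {α β : Type} (l : List α) (f g : α → List β)
    (h : ∀ x ∈ l, f x = g x) : l.flatMap f = l.flatMap g := by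
  induction l with
  | nil => rfl
  | cons a t ih =>
      simp only [List.flatMap_cons]
      rw [h a (List.mem_cons_self ..), ih (fun x hx => h x (List.mem_cons_of_mem _ hx))]

-- membership in the attacked-set building loop
theorem pvMem_fold_add (r c : Int) (l : List Int) (s : PySem.Set (Int × Int)) (p : Int × Int) :
    p ∈ l.foldl (fun attacked k =>
      (((attacked.add (r, k)).add (k, c)).add (k, k - (r - c))).add (k, (r + c) - k)) s ↔
    p ∈ s ∨ ∃ k ∈ l, p = (r, k) ∨ p = (k, c) ∨ p = (k, k - (r - c)) ∨ p = (k, (r + c) - k) := by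
  induction l generalizing s with
  | nil => simp
  | cons a t ih =>
      simp only [List.foldl_cons, ih, PySem.Set.mem_add, List.mem_cons]
      constructor
      · rintro (((((h | h) | h) | h) | h) | ⟨k, hk, h⟩)
        · exact Or.inl h
        · exact Or.inr ⟨a, Or.inl rfl, Or.inl h⟩
        · exact Or.inr ⟨a, Or.inl rfl, Or.inr (Or.inl h)⟩
        · exact Or.inr ⟨a, Or.inl rfl, Or.inr (Or.inr (Or.inl h))⟩
        · exact Or.inr ⟨a, Or.inl rfl, Or.inr (Or.inr (Or.inr h))⟩
        · exact Or.inr ⟨k, Or.inr hk, h⟩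
      · rintro (h | ⟨k, (rfl | hk), h⟩)
        · exact Or.inl (Or.inl (Or.inl (Or.inl (Or.inl h))))
        · rcases h with h | h | h | h
          · exact Or.inl (Or.inl (Or.inl (Or.inl (Or.inr h))))
          · exact Or.inl (Or.inl (Or.inl (Or.inr h)))
          · exact Or.inl (Or.inl (Or.inr h))
          · exact Or.inl (Or.inr h)
        · exact Or.inr ⟨k, hk, h⟩

-- membership in the attacked set, for on-board squares
theorem pvMem_attacked (r c i j : Int) (hi : 0 ≤ i ∧ i < 8) (hj : 0 ≤ j ∧ j < 8) :
    ((i, j) ∈ pvAttacked r c) ↔ (i = r ∨ j = c ∨ i + j = r + c ∨ i - j = r - c) := by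
  unfold pvAttacked
  rw [pvMem_fold_add]
  simp only [PySem.Set.empty, List.not_mem_nil, false_or, PySem.List.mem_pyRange_one,
    Prod.mk.injEq]
  constructor
  · rintro ⟨k, hk, h⟩
    omega
  · rintro (h | h | h | h)
    · exact ⟨j, by omega, by omega⟩
    · exact ⟨i, by omega, by omega⟩
    · exact ⟨i, by omega, by omega⟩
    · exact ⟨i, by omega, by omega⟩

-- the canonical form both ports reduce to
def pvCanon (r c : Int) : List (Int × Int) :=
  [0, 1, 2, 3, 4, 5, 6, 7].flatMap (fun i =>
    (([0, 1, 2, 3, 4, 5, 6, 7] : List Int).filter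
      (fun j => decide ¬(i = r ∨ j = c ∨ i + j = r + c ∨ i - j = r - c))).map
      (fun j => (i, j)))

theorem pvA_eq (r c : Int) : all_safe_squares (r, c) = pvCanon r c := by
  unfold all_safe_squares
  have hinner : ∀ (i : Int) (acc : List (Int × Int)),
      (PySem.List.pyRange 0 8 1).foldl (fun safe_squares j =>
        if j == c then safe_squares
        else if i + j == r + c || i - j == r - c then safe_squares
        else safe_squares ++ [(i, j)]) acc
      = acc ++ ((PySem.List.pyRange 0 8 1).filter
          (fun j => !(j == c || i + j == r + c || i - j == r - c))).map (fun j => (i, j)) := by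
    intro i acc
    have hbody : (fun (safe_squares : List (Int × Int)) (j : Int) =>
        if j == c then safe_squares
        else if i + j == r + c || i - j == r - c then safe_squares
        else safe_squares ++ [(i, j)])
      = (fun safe_squares j =>
        if (!(j == c || i + j == r + c || i - j == r - c)) then safe_squares ++ [(i, j)]
        else safe_squares) := by
      funext acc' j
      cases h1 : (j == c) <;> cases h2 : (i + j == r + c) <;> cases h3 : (i - j == r - c) <;>
        simp
    rw [hbody, PySem.List.foldl_append_if]
  simp only [hinner]
  have houter : (fun (safe_squares : List (Int × Int)) (i : Int) =>
      if i == r then safe_squares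
      else safe_squares ++ ((PySem.List.pyRange 0 8 1).filter
        (fun j => !(j == c || i + j == r + c || i - j == r - c))).map (fun j => (i, j)))
    = (fun safe_squares i => safe_squares ++
        (if i == r then [] else ((PySem.List.pyRange 0 8 1).filter
          (fun j => !(j == c || i + j == r + c || i - j == r - c))).map (fun j => (i, j)))) := by
    funext acc i
    cases h : (i == r) <;> simp
  rw [houter, PySem.List.foldl_append_eq_flatMap, List.nil_append, pvCanon, pvRange8]
  apply pvFlatMap_congr
  intro i hiR
  have hi : 0 ≤ i ∧ i < 8 := by
    simp only [List.mem_cons, List.not_mem_nil, or_false] at hiR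
    omega
  by_cases hir : i = r
  · subst hir
    simp
  · simp only [beq_iff_eq, if_neg hir]
    congr 1
    apply List.filter_congr
    intro j _
    rw [Bool.eq_iff_iff]
    simp [hir]
    tauto

theorem pvB_eq (r c : Int) : all_safe_squares_alt (r, c) = pvCanon r c := by
  unfold all_safe_squares_alt pvCanon
  simp only [pvRange8]
  apply pvFlatMap_congr
  intro i hiR
  have hi : 0 ≤ i ∧ i < 8 := by
    simp only [List.mem_cons, List.not_mem_nil, or_false] at hiR
    omega
  have hfilt : ([0, 1, 2, 3, 4, 5, 6, 7] : List Int).filter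
      (fun j => !(pvAttacked r c).contains (i, j))
      = ([0, 1, 2, 3, 4, 5, 6, 7] : List Int).filter
      (fun j => decide ¬(i = r ∨ j = c ∨ i + j = r + c ∨ i - j = r - c)) := by
    apply List.filter_congr
    intro j hjR
    have hj : 0 ≤ j ∧ j < 8 := by
      simp only [List.mem_cons, List.not_mem_nil, or_false] at hjR
      omega
    rw [Bool.eq_iff_iff]
    simp only [Bool.not_eq_eq_eq_not, Bool.not_true, decide_eq_true_eq,
      ← Bool.not_eq_true, PySem.Set.contains_iff]
    rw [pvMem_attacked r c i j hi hj]
  rw [hfilt]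

-- ===== VERDICT (by name: the statement is the Claim_ definition above) =====
theorem all_safe_squares_spec : Claim_equal_all_safe_squares := by
  intro queen _
  obtain ⟨r, c⟩ := queen
  unfold Spec_all_safe_squares
  rw [pvA_eq, pvB_eq]
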